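-- pv_equiv track=rewrite | github.com/ashwin-nat/pits-n-giggles | apps/save_viewer/save_viewer_state/get_telemetry_info.py | _get_last_lap_time_ms
-- ===== SOURCE A (Python) =====
-- from typing import Any, Dict, List, Optional
--
-- def _get_last_lap_time_ms(session_history: Dict[str, Any]) -> int:
--     """
--     Extract the most recent completed lap time in milliseconds.
--
--     Args:
--         session_history: Session history data containing lap times
--
--     Returns:
--         Last completed lap time in milliseconds, or 0 if no valid lap found
--     """
--     if last_lap := next(
--         (entry for entry in reversed(session_history["lap-history-data"])
--          if entry.get("lap-time-in-ms", 0) > 0),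
--         None
--     ):
--         return last_lap["lap-time-in-ms"]
--     return 0
-- ===== SOURCE B (Python) =====
-- def _get_last_lap_time_ms(session_history):
--     result = 0
--     for entry in session_history["lap-history-data"]:
--         t = entry.get("lap-time-in-ms", 0)
--         if t > 0:
--             result = t
--     return result
-- ===== Notes on version B (the rewrite author's own statement) =====
-- stated objective: simpler
-- what changed: Replaces the reverse-iterator/next/walrus early-exit scan by a single forward loop that keeps overwriting an accumulator with each positive lap time, so the last positive one wins.
import Mathlib
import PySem

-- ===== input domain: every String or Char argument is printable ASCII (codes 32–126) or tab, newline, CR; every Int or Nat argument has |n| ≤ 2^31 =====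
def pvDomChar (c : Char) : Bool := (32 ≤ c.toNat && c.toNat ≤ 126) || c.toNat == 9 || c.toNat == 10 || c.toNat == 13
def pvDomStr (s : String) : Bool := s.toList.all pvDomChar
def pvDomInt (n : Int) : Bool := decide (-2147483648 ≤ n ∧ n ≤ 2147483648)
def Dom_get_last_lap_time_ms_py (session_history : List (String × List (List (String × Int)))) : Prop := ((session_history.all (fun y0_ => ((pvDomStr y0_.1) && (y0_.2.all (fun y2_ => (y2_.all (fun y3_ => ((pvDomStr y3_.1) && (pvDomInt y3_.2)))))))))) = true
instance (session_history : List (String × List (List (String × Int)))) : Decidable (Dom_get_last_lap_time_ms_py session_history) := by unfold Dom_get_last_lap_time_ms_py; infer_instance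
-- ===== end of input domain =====

-- B replaces A's reverse scan with early exit by a forward loop keeping the last positive lap time (same O(n) cost, plainer code).
-- ===== PORT A =====
def get_last_lap_time_ms_py (session_history : List (String × List (List (String × Int)))) : Int :=
  -- session_history["lap-history-data"]: first-match assoc lookup; Pre_ guarantees the key is present
  let data := (session_history.lookup "lap-history-data").getD []
  -- next((entry for entry in reversed(data) if entry.get("lap-time-in-ms", 0) > 0), None)
  match data.reverse.find? (fun entry => decide (((entry.lookup "lap-time-in-ms").getD 0) > 0)) with
  | some last_lap =>
    -- walrus truthiness: a found entry is a non-empty dict, hence truthy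
    if last_lap ≠ [] then (last_lap.lookup "lap-time-in-ms").getD 0 else 0
  | none => 0

-- ===== PORT B =====
def get_last_lap_time_ms_py_alt (session_history : List (String × List (List (String × Int)))) : Int :=
  ((session_history.lookup "lap-history-data").getD []).foldl
    (fun result entry =>
      let t := (entry.lookup "lap-time-in-ms").getD 0
      if t > 0 then t else result)
    0

-- ===== PRECONDITION & SPEC =====
-- Pre_ excludes exactly the inputs where A (and B alike) raises KeyError: the key "lap-history-data" absent.
def Pre_get_last_lap_time_ms_py (session_history : List (String × List (List (String × Int)))) : Prop :=
  (session_history.lookup "lap-history-data").isSome = true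
instance (session_history : List (String × List (List (String × Int)))) : Decidable (Pre_get_last_lap_time_ms_py session_history) := by unfold Pre_get_last_lap_time_ms_py; infer_instance
def pvWitness_get_last_lap_time_ms_py : (List (String × List (List (String × Int)))) :=
  [("lap-history-data", [[("lap-time-in-ms", 5)]])]

def Spec_get_last_lap_time_ms_py (session_history : List (String × List (List (String × Int)))) (out : Int) : Prop := out = get_last_lap_time_ms_py_alt session_history
instance (session_history : List (String × List (List (String × Int)))) (out : Int) : Decidable (Spec_get_last_lap_time_ms_py session_history out) := by unfold Spec_get_last_lap_time_ms_py; infer_instance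

-- ===== CLAIM (what is proved, stated in full; the proofs are below) =====
def Claim_equal_get_last_lap_time_ms_py : Prop := ∀ (session_history : List (String × List (List (String × Int)))), Dom_get_last_lap_time_ms_py session_history → Pre_get_last_lap_time_ms_py session_history → Spec_get_last_lap_time_ms_py session_history (get_last_lap_time_ms_py session_history)

-- ===== LEMMAS AND PROOFS =====
-- The reverse scan for the first positive value equals the forward fold keeping the last positive value.
theorem find_rev_eq_foldl (f : List (String × Int) → Int) (hf : f [] = 0) (l : List (List (String × Int))) :
    (match l.reverse.find? (fun e => decide (f e > 0)) with
     | some e => if e ≠ [] then f e else 0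
     | none => (0 : Int))
    = l.foldl (fun r e => let t := f e; if t > 0 then t else r) 0 := by
  induction l using List.reverseRecOn with
  | nil => simp
  | append_singleton l x ih =>
    simp only [List.reverse_append, List.reverse_cons, List.reverse_nil, List.nil_append,
      List.cons_append, List.find?_cons, List.foldl_append, List.foldl_cons, List.foldl_nil]
    by_cases h : f x > 0
    · have hne : x ≠ [] := by
        intro hx; subst hx; omega
      simp [h, hne]
    · rw [if_neg h]
      simpa [h] using ih

-- ===== VERDICT (by name: the statement is the Claim_ definition above) =====
theorem get_last_lap_time_ms_py_spec : Claim_equal_get_last_lap_time_ms_py := by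
  intro sh _ _
  unfold Spec_get_last_lap_time_ms_py get_last_lap_time_ms_py get_last_lap_time_ms_py_alt
  exact find_rev_eq_foldl (fun e => (e.lookup "lap-time-in-ms").getD 0) rfl _
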